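-- pv_equiv track=rewrite | github.com/JLRRC/TFM_VIU_09MIAR | agarre_ros2_ws/src/ur5_qt_panel/ur5_qt_panel/panel_utils.py | _frame_depth
-- ===== SOURCE A (Python) =====
-- from typing import TYPE_CHECKING, Dict, List, Optional, Set, Tuple
--
-- def _frame_depth(
--     frame: str,
--     parent_map: Dict[str, str],
--     cache: Dict[str, int],
--     visiting: Optional[Set[str]] = None,
-- ) -> int:
--     if frame in cache:
--         return cache[frame]
--     if visiting is None:
--         visiting = set()
--     if frame in visiting:
--         cache[frame] = 0
--         return 0
--     visiting.add(frame)
--     parent = parent_map.get(frame)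
--     if not parent or parent == frame:
--         depth = 0
--     else:
--         depth = 1 + _frame_depth(parent, parent_map, cache, visiting)
--     visiting.remove(frame)
--     cache[frame] = depth
--     return depth
-- ===== SOURCE B (Python) =====
-- def _frame_depth(frame, parent_map, cache, visiting=None):
--     # Iterative: walk the parent chain, then backfill the cache from the stop point.
--     seen = set(visiting) if visiting is not None else set()
--     chain = []
--     node = frame
--     while node not in cache:
--         if node in seen:
--             cache[node] = 0
--             break
--         parent = parent_map.get(node)
--         if not parent or parent == node:
--             cache[node] = 0
--             break
--         seen.add(node)
--         chain.append(node)
--         node = parent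
--     depth = cache[node]
--     for f in reversed(chain):
--         depth += 1
--         cache[f] = depth
--     return depth
-- ===== Notes on version B (the rewrite author's own statement) =====
-- stated objective: alternative
-- what changed: Replaces A's memoized recursion over the parent chain with an iterative walk that records the chain and then back-fills the cache from the stop point.
import Mathlib
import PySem

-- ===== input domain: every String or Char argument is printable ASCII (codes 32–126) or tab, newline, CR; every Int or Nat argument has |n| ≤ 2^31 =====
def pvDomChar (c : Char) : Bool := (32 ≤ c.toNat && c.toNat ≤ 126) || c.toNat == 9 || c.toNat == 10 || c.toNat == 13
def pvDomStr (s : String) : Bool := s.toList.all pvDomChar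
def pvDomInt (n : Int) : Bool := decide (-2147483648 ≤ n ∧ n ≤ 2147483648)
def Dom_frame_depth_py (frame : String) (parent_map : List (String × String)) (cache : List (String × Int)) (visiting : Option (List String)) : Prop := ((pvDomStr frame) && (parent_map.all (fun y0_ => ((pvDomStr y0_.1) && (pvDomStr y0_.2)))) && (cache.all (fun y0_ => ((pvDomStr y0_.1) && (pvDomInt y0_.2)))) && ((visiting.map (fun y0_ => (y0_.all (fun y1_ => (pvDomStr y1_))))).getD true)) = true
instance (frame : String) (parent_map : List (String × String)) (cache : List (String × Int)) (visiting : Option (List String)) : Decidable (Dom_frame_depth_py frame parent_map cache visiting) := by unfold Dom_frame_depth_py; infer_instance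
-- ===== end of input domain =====

-- B replaces A's memoized recursion with an iterative walk down the parent chain followed by a
-- back-fill of the cache; equivalence is proved for the RETURN value (both Pythons also mutate
-- `cache` identically, but that side effect is not part of the Lean claim).

-- ===== PORT A =====
-- Recursive descent exactly as A; `fuel = parent_map.length + 2` bounds the recursion depth
-- (each recursive step adds the current frame to `visiting`, and every later frame is a
-- parent_map value not yet in `visiting`), so the 0-fuel branch is never reached on any input.
def pvGoA (pm : PySem.Dict String String) (cache : PySem.Dict String Int) :
    Nat → String → List String → Int
  | fuel, frame, visiting =>
    match cache.get? frame with
    | some v => v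
    | none =>
      match fuel with
      | 0 => 0
      | f + 1 =>
        if frame ∈ visiting then 0
        else
          match pm.get? frame with
          | none => 0
          | some parent =>
            if parent = "" ∨ parent = frame then 0
            else 1 + pvGoA pm cache f parent (visiting ++ [frame])

def frame_depth_py (frame : String) (parent_map : List (String × String)) (cache : List (String × Int)) (visiting : Option (List String)) : Int :=
  pvGoA (PySem.Dict.mk parent_map) (PySem.Dict.mk cache) (parent_map.length + 2) frame (visiting.getD [])

-- ===== PORT B =====
-- B's while-loop: walk the chain until a cached node, a seen node (cycle) or a root; returns the
-- final cache, the stop node and the chain of nodes walked.  Same fuel bound as the A port.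
def pvGoB (pm : PySem.Dict String String) :
    Nat → String → PySem.Dict String Int → List String → List String →
      PySem.Dict String Int × String × List String
  | fuel, node, cache, seen, chain =>
    match cache.get? node with
    | some _ => (cache, node, chain)
    | none =>
      match fuel with
      | 0 => (cache, node, chain)
      | f + 1 =>
        if node ∈ seen then (cache.insert node 0, node, chain)
        else
          match pm.get? node with
          | none => (cache.insert node 0, node, chain)
          | some parent =>
            if parent = "" ∨ parent = node then (cache.insert node 0, node, chain)
            else pvGoB pm f parent cache (seen ++ [node]) (chain ++ [node])

def frame_depth_py_alt (frame : String) (parent_map : List (String × String)) (cache : List (String × Int)) (visiting : Option (List String)) : Int :=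
  let r := pvGoB (PySem.Dict.mk parent_map) (parent_map.length + 2) frame (PySem.Dict.mk cache) (visiting.getD []) []
  -- depth = cache[node]; for f in reversed(chain): depth += 1; cache[f] = depth
  (r.2.2.reverse.foldl (fun (st : Int × PySem.Dict String Int) f => (st.1 + 1, st.2.insert f (st.1 + 1)))
    (r.1.getD r.2.1 0, r.1)).1

-- ===== PRECONDITION & SPEC =====
def Spec_frame_depth_py (frame : String) (parent_map : List (String × String)) (cache : List (String × Int)) (visiting : Option (List String)) (out : Int) : Prop := out = frame_depth_py_alt frame parent_map cache visiting
instance (frame : String) (parent_map : List (String × String)) (cache : List (String × Int)) (visiting : Option (List String)) (out : Int) : Decidable (Spec_frame_depth_py frame parent_map cache visiting out) := by unfold Spec_frame_depth_py; infer_instance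

-- ===== CLAIM (what is proved, stated in full; the proofs are below) =====
def Claim_equal_frame_depth_py : Prop := ∀ (frame : String) (parent_map : List (String × String)) (cache : List (String × Int)) (visiting : Option (List String)), Dom_frame_depth_py frame parent_map cache visiting → Spec_frame_depth_py frame parent_map cache visiting (frame_depth_py frame parent_map cache visiting)

-- ===== LEMMAS AND PROOFS =====

-- The back-fill fold only ever adds 1 to the depth component, once per chain element.
theorem pvFoldFst (l : List String) (d : Int) (c : PySem.Dict String Int) :
    (l.foldl (fun (st : Int × PySem.Dict String Int) f => (st.1 + 1, st.2.insert f (st.1 + 1))) (d, c)).1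
      = d + l.length := by
  induction l generalizing d c with
  | nil => simp
  | cons x xs ih => simp [List.foldl, ih]; ring

-- Main invariant: A's recursive depth plus the length of the chain already walked equals
-- B's stop-node depth plus the length of B's final chain.
theorem pvGoMain (pm : PySem.Dict String String) (cache : PySem.Dict String Int)
    (fuel : Nat) (node : String) (seen chain : List String) :
    pvGoA pm cache fuel node seen + (chain.length : Int)
      = ((pvGoB pm fuel node cache seen chain).1.getD (pvGoB pm fuel node cache seen chain).2.1 0)
        + ((pvGoB pm fuel node cache seen chain).2.2.length : Int) := by
  induction fuel generalizing node seen chain with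
  | zero =>
    rw [pvGoA, pvGoB]
    cases h : cache.get? node with
    | some v => simp [PySem.Dict.getD_eq_get?_getD, h]
    | none => simp [PySem.Dict.getD_eq_get?_getD, h]
  | succ f ih =>
    rw [pvGoA, pvGoB]
    cases h : cache.get? node with
    | some v => simp [PySem.Dict.getD_eq_get?_getD, h]
    | none =>
      simp only []
      by_cases hs : node ∈ seen
      · simp [hs, PySem.Dict.getD_insert_self]
      · simp only [hs, if_false]
        cases hp : pm.get? node with
        | none => simp [PySem.Dict.getD_insert_self]
        | some parent =>
          by_cases hpe : parent = "" ∨ parent = node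
          · simp [hpe, PySem.Dict.getD_insert_self]
          · simp only [hpe, if_neg, not_false_iff]
            have := ih parent (seen ++ [node]) (chain ++ [node])
            simp only [List.length_append, List.length_cons, List.length_nil] at this
            push_cast at this ⊢
            omega

theorem frame_depth_py_spec : Claim_equal_frame_depth_py := by
  intro frame pm cache visiting _
  unfold Spec_frame_depth_py frame_depth_py frame_depth_py_alt
  simp only [pvFoldFst, List.length_reverse]
  have := pvGoMain (PySem.Dict.mk pm) (PySem.Dict.mk cache) (pm.length + 2) frame (visiting.getD []) []
  simp only [List.length_nil, Int.natCast_zero, add_zero] at this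
  omega
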